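-- pv_equiv track=rewrite | github.com/jaimeercilla11/Distributed-Matrix-Multiplication | python/distributed_matrix_multiplication.py | map_worker
-- ===== SOURCE A (Python) =====
-- def map_worker(args):
--     A_block, B, block_id, start_row = args
--     results = []
--
--     for local_i, row_A in enumerate(A_block):
--         global_i = start_row + local_i
--         for j in range(len(B[0])):
--             partial_sum = sum(row_A[k] * B[k][j] for k in range(len(row_A)))
--             results.append(((global_i, j), partial_sum))
--
--     return results
-- ===== SOURCE B (Python) =====
-- def map_worker(args):
--     A_block, B, block_id, start_row = args
--     results = []
--     for local_i, row_A in enumerate(A_block):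
--         cols = len(B[0])
--         acc = [0] * cols
--         for a, row_B in zip(row_A, B):
--             for j in range(cols):
--                 acc[j] += a * row_B[j]
--         gi = start_row + local_i
--         for j in range(cols):
--             results.append(((gi, j), acc[j]))
--     return results
-- ===== Notes on version B (the rewrite author's own statement) =====
-- stated objective: alternative
-- what changed: Replaces the ijk triple loop (a full generator-sum dot product per output cell) with an ikj traversal keeping a per-row list of column accumulators updated while zipping the A-row with B's rows, then emitting the indexed cells from the accumulator.
import Mathlib
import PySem

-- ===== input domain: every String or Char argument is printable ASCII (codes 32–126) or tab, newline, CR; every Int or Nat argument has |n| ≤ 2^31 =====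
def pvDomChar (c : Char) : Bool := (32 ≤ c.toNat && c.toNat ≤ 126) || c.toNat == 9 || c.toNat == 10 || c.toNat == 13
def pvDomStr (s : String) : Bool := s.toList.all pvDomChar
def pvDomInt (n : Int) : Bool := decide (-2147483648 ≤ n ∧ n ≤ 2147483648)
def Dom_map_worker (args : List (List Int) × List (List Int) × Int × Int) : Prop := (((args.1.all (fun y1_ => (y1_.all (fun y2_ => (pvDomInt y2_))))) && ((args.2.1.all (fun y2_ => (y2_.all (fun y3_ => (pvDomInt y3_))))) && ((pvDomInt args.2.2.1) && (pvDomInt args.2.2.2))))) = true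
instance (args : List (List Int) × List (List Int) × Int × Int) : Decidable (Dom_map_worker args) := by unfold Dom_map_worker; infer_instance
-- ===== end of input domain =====

-- B replaces the ijk triple loop (one full dot product per emitted cell) with an ikj sweep that
-- maintains a per-row list of column accumulators while zipping the A-row with B's rows (objective: alternative).


-- ===== PORT A =====
-- A: for each (local_i, row_A) in enumerate(A_block), for each j in range(len(B[0])),
-- append ((start_row+local_i, j), sum over k of row_A[k]*B[k][j]).
def map_worker (args : List (List Int) × List (List Int) × Int × Int) : List ((Int × Int) × Int) :=
  let Ab := args.1
  let Bm := args.2.1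
  let sr := args.2.2.2
  (PySem.List.enumerate Ab 0).foldl (fun results p =>
    let gi := sr + p.1
    (List.range Bm.headI.length).foldl (fun results j =>
      let ps := (List.range p.2.length).foldl
        (fun s k => s + p.2.getD k 0 * (Bm.getD k []).getD j 0) 0
      results ++ [((gi, (Int.ofNat j)), ps)]) results) []

-- ===== PORT B =====
-- one A-row: acc = [0]*cols; for (a, row_B) in zip(row_A, B): for j in range(cols): acc[j] += a*row_B[j]
def mwRow (Bm : List (List Int)) (cols : Nat) (row : List Int) : List Int :=
  (row.zip Bm).foldl
    (fun acc p =>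
      (List.range cols).foldl (fun acc j => acc.set j (acc.getD j 0 + p.1 * p.2.getD j 0)) acc)
    (List.replicate cols 0)

def mwRows (Bm : List (List Int)) (sr : Int) : List (List Int) → Int → List ((Int × Int) × Int)
  | [], _ => []
  | row :: rest, li =>
      let cols := Bm.headI.length
      let acc := mwRow Bm cols row
      ((List.range cols).map (fun j => ((sr + li, (Int.ofNat j)), acc.getD j 0))) ++
        mwRows Bm sr rest (li + 1)

def map_worker_alt (args : List (List Int) × List (List Int) × Int × Int) : List ((Int × Int) × Int) :=
  mwRows args.2.1 args.2.2.2 args.1 0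

-- ===== PRECONDITION & SPEC =====
-- Pre_ excludes exactly the inputs on which the Python A raises an IndexError: a nonempty A_block
-- with empty B (B[0]), a row of A_block longer than B (B[k]), or a used row of B shorter than B[0]
-- (B[k][j]) — except that with len(B[0]) == 0 the inner loop never runs and A returns normally.
def Pre_map_worker (args : List (List Int) × List (List Int) × Int × Int) : Prop :=
  args.1 = [] ∨
    (args.2.1 ≠ [] ∧
      (args.2.1.headI.length = 0 ∨
        ∀ row ∈ args.1, row.length ≤ args.2.1.length ∧
          ∀ k < row.length, args.2.1.headI.length ≤ (args.2.1.getD k []).length))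
instance (args : List (List Int) × List (List Int) × Int × Int) : Decidable (Pre_map_worker args) := by unfold Pre_map_worker; infer_instance

def pvWitness_map_worker : (List (List Int) × List (List Int) × Int × Int) :=
  ([[1, 2], [3, 4]], [[5, 6], [7, 8]], 0, 10)

def Spec_map_worker (args : List (List Int) × List (List Int) × Int × Int) (out : List ((Int × Int) × Int)) : Prop := out = map_worker_alt args
instance (args : List (List Int) × List (List Int) × Int × Int) (out : List ((Int × Int) × Int)) : Decidable (Spec_map_worker args out) := by unfold Spec_map_worker; infer_instance

-- ===== CLAIM (what is proved, stated in full; the proofs are below) =====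
def Claim_equal_map_worker : Prop := ∀ (args : List (List Int) × List (List Int) × Int × Int), Dom_map_worker args → Pre_map_worker args → Spec_map_worker args (map_worker args)

-- ===== LEMMAS AND PROOFS =====

-- One pass of B's inner j-loop over an accumulator of shape (range cols).map g adds t j at slot j.
theorem mw_upd (cols : Nat) (g t : Nat → Int) :
    ∀ n, n ≤ cols →
      (List.range n).foldl (fun acc j => acc.set j (acc.getD j 0 + t j))
          ((List.range cols).map g)
        = (List.range cols).map (fun i => if i < n then g i + t i else g i) := by
  intro n
  induction n with
  | zero => intro _; simp
  | succ m ih =>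
      intro hle
      rw [List.range_succ, List.foldl_append]
      rw [ih (by omega)]
      have hm : m < cols := by omega
      simp only [List.foldl_cons, List.foldl_nil]
      rw [PySem.List.getD_map_range _ _ _ _ hm]
      simp only [lt_irrefl, if_false]
      apply List.ext_getElem
      · simp
      · intro i hi hi'
        simp only [List.length_set, List.length_map, List.length_range] at hi
        rw [List.getElem_set]
        by_cases him : i = m
        · subst him
          rw [if_pos rfl, List.getElem_map, List.getElem_range, if_pos (by omega : i < i + 1)]
        · rw [if_neg (fun h => him h.symm)]
          simp only [List.getElem_map, List.getElem_range]
          by_cases h1 : i < m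
          · rw [if_pos h1, if_pos (by omega)]
          · rw [if_neg h1, if_neg (by omega)]

-- Folding B's k-loop over any pair list turns the accumulator map pointwise into the running sum.
theorem mw_accum (cols : Nat) :
    ∀ (ps : List (Int × List Int)) (g : Nat → Int),
      ps.foldl
          (fun acc p =>
            (List.range cols).foldl
              (fun acc j => acc.set j (acc.getD j 0 + p.1 * p.2.getD j 0)) acc)
          ((List.range cols).map g)
        = (List.range cols).map
            (fun j => ps.foldl (fun s p => s + p.1 * p.2.getD j 0) (g j)) := by
  intro ps
  induction ps with
  | nil => intro g; simp
  | cons p t ih =>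
      intro g
      simp only [List.foldl_cons]
      rw [mw_upd cols g (fun j => p.1 * p.2.getD j 0) cols (le_refl _)]
      rw [show ((List.range cols).map fun i =>
            if i < cols then g i + p.1 * p.2.getD i 0 else g i)
          = (List.range cols).map (fun i => g i + p.1 * p.2.getD i 0) from
        List.map_congr_left (by intro i hi; rw [if_pos (List.mem_range.mp hi)])]
      rw [ih]

-- B's accumulator entry j is exactly A's dot-product sum for column j (when the A-row fits in B).
theorem mwRow_getD (Bm : List (List Int)) (cols : Nat) (row : List Int)
    (hlen : row.length ≤ Bm.length) (j : Nat) (hj : j < cols) :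
    (mwRow Bm cols row).getD j 0
      = (List.range row.length).foldl
          (fun s k => s + row.getD k 0 * (Bm.getD k []).getD j 0) 0 := by
  unfold mwRow
  rw [show (List.replicate cols (0 : Int)) = (List.range cols).map (fun _ => 0) by
        simp [List.map_const']]
  rw [mw_accum cols (row.zip Bm) (fun _ => 0)]
  rw [PySem.List.getD_map_range _ _ _ _ hj]
  rw [PySem.List.foldl_add, PySem.List.foldl_add]
  simp only [Int.zero_add]
  congr 1
  apply List.ext_getElem
  · simp [List.length_zip]; omega
  · intro i hi hi'
    simp only [List.length_map, List.length_zip] at hi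
    have hir : i < row.length := by omega
    have hib : i < Bm.length := by omega
    simp only [List.getElem_map, List.getElem_range, List.getElem_zip,
      List.getD_eq_getElem _ _ hir, List.getD_eq_getElem _ _ hib]

-- the chunk emitted for one A-row is the same on both sides
theorem chunk_eq (Bm : List (List Int)) (row : List Int) (gi : Int)
    (h : Bm.headI.length = 0 ∨ row.length ≤ Bm.length) :
    (List.range Bm.headI.length).map (fun j =>
        ((gi, (Int.ofNat j)),
          (List.range row.length).foldl
            (fun s k => s + row.getD k 0 * (Bm.getD k []).getD j 0) 0))
      = (List.range Bm.headI.length).map (fun j =>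
          ((gi, (Int.ofNat j)), (mwRow Bm Bm.headI.length row).getD j 0)) := by
  rcases h with h | h
  · simp [h]
  · apply List.map_congr_left
    intro j hj
    rw [mwRow_getD Bm _ row h j (List.mem_range.mp hj)]

-- the outer loops agree, for any enumeration start and accumulated output
theorem outer_eq (Bm : List (List Int)) (sr : Int) :
    ∀ (Ab : List (List Int)) (s : Int) (r0 : List ((Int × Int) × Int)),
      (∀ row ∈ Ab, Bm.headI.length = 0 ∨ row.length ≤ Bm.length) →
      (PySem.List.enumerate Ab s).foldl (fun results p =>
          (List.range Bm.headI.length).foldl (fun results j =>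
            results ++ [((sr + p.1, (Int.ofNat j)),
              (List.range p.2.length).foldl
                (fun acc k => acc + p.2.getD k 0 * (Bm.getD k []).getD j 0) 0)]) results) r0
        = r0 ++ mwRows Bm sr Ab s := by
  intro Ab
  induction Ab with
  | nil => intro s r0 _; simp [mwRows, PySem.List.enumerate]
  | cons row rest ih =>
      intro s r0 hrows
      rw [PySem.List.enumerate_cons, List.foldl_cons]
      rw [PySem.List.foldl_append_singleton_eq_map
        (fun j => ((sr + s, (Int.ofNat j)),
          (List.range row.length).foldl
            (fun acc k => acc + row.getD k 0 * (Bm.getD k []).getD j 0) 0))]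
      rw [ih (s + 1) _ (fun r hr => hrows r (List.mem_cons_of_mem _ hr))]
      rw [chunk_eq Bm row (sr + s) (hrows row List.mem_cons_self)]
      simp [mwRows, List.append_assoc]

-- ===== VERDICT (by name: the statement is the Claim_ definition above) =====
theorem map_worker_spec : Claim_equal_map_worker := by
  intro args _ hpre
  obtain ⟨Ab, Bm, bid, sr⟩ := args
  unfold Spec_map_worker map_worker map_worker_alt
  simp only []
  have hrows : ∀ row ∈ Ab, Bm.headI.length = 0 ∨ row.length ≤ Bm.length := by
    rcases hpre with h | ⟨_, h | h⟩
    · intro row hr; rw [show Ab = [] from h] at hr; cases hr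
    · intro row _; exact Or.inl h
    · intro row hr; exact Or.inr (h row hr).1
  exact outer_eq Bm sr Ab 0 [] hrows
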